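-- pv_equiv track=rewrite | github.com/Trummler12/Schoolsystem2 | backend/src/main/resources/scripts/resource_tags_assignment.py | assign_weights
-- ===== SOURCE A (Python) =====
-- from typing import Dict, Iterable, List, Optional, Sequence, Set, Tuple
--
-- MAX_WEIGHTS = 5  # we only emit the first 5 tags (weights 5..1)
--
-- def assign_weights(tag_ids: Sequence[int]) -> List[int]:
--     weights = []
--     for idx, _ in enumerate(tag_ids[:MAX_WEIGHTS]):
--         weight = MAX_WEIGHTS - idx
--         if weight <= 0:
--             break
--         weights.append(weight)
--     return weights
-- ===== SOURCE B (Python) =====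
-- from typing import List, Sequence
--
-- MAX_WEIGHTS = 5
--
-- def assign_weights(tag_ids: Sequence[int]) -> List[int]:
--     # Recursive countdown: pair the current weight with the head of the
--     # remaining sequence, recursing on the tail until the weight runs out
--     # or the sequence is exhausted.
--     def go(seq, w):
--         if w == 0 or not seq:
--             return []
--         return [w] + go(seq[1:], w - 1)
--     return go(list(tag_ids), MAX_WEIGHTS)
-- ===== Notes on version B (the rewrite author's own statement) =====
-- stated objective: alternative
-- what changed: B replaces A's iterative enumerate-slice loop with an append accumulator and dead break guard by a top-down recursion that counts the weight down from 5 while consuming the sequence, building the result front-to-back by cons.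
import Mathlib
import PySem

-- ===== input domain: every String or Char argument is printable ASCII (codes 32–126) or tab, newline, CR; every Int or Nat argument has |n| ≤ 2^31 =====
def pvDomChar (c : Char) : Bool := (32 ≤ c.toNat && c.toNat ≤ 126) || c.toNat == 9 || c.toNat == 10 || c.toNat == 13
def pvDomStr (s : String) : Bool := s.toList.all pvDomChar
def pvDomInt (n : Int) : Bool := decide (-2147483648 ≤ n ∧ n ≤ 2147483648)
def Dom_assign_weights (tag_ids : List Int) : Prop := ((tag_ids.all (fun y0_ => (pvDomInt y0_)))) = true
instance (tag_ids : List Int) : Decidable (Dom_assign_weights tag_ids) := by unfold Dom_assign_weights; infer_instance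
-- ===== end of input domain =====

-- ===== PORT A =====
-- B changes: recursion counting the weight down from 5 while consuming the list,
-- instead of A's enumerate-slice accumulator loop (objective: alternative).
def pvMAX_WEIGHTS : Int := 5

-- the loop body of A: walk enumerate(tag_ids[:5]) accumulating weights, with A's break guard
def assignWeightsLoop : List (Int × Int) → List Int → List Int
  | [], weights => weights
  | (idx, _) :: rest, weights =>
    let weight := pvMAX_WEIGHTS - idx
    if weight ≤ 0 then weights
    else assignWeightsLoop rest (weights ++ [weight])

def assign_weights (tag_ids : List Int) : List Int :=
  assignWeightsLoop (PySem.List.enumerate (PySem.List.slice tag_ids none (some pvMAX_WEIGHTS)) 0) []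

-- ===== PORT B =====
-- B's inner recursion go(seq, w): cons w and recurse on seq[1:] with w-1
def assignWeightsGo : List Int → Int → List Int
  | seq, w =>
    if w = 0 ∨ seq = [] then []
    else w :: assignWeightsGo (PySem.List.slice seq (some 1) none) (w - 1)
  termination_by seq _ => seq.length
  decreasing_by
    simp [PySem.List.slice_from_one]
    cases seq with
    | nil => simp_all
    | cons x xs => simp

def assign_weights_alt (tag_ids : List Int) : List Int :=
  assignWeightsGo tag_ids pvMAX_WEIGHTS

-- ===== PRECONDITION & SPEC =====
def Spec_assign_weights (tag_ids : List Int) (out : List Int) : Prop := out = assign_weights_alt tag_ids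
instance (tag_ids : List Int) (out : List Int) : Decidable (Spec_assign_weights tag_ids out) := by unfold Spec_assign_weights; infer_instance

-- ===== CLAIM =====
def Claim_equal_assign_weights : Prop := ∀ (tag_ids : List Int), Dom_assign_weights tag_ids → Spec_assign_weights tag_ids (assign_weights tag_ids)

-- ===== LEMMAS AND PROOFS =====
-- both sides depend only on min(length, 5): case on the first five cons cells
theorem assign_weights_eq_alt (tag_ids : List Int) :
    assign_weights tag_ids = assign_weights_alt tag_ids := by
  have go_unfold : ∀ (seq : List Int) (w : Int),
      assignWeightsGo seq w =
        if w = 0 ∨ seq = [] then []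
        else w :: assignWeightsGo (PySem.List.slice seq (some 1) none) (w - 1) := by
    intro seq w; rw [assignWeightsGo]
  match tag_ids with
  | [] =>
    simp [assign_weights, assignWeightsLoop, assign_weights_alt, PySem.List.slice,
      PySem.List.enumerate, pvMAX_WEIGHTS, go_unfold]
  | [a] =>
    simp [assign_weights, assignWeightsLoop, assign_weights_alt, PySem.List.slice,
      PySem.List.enumerate, pvMAX_WEIGHTS, go_unfold, PySem.List.slice_from_one]
  | [a,b] =>
    simp [assign_weights, assignWeightsLoop, assign_weights_alt, PySem.List.slice,
      PySem.List.enumerate, pvMAX_WEIGHTS, go_unfold, PySem.List.slice_from_one]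
  | [a,b,c] =>
    simp [assign_weights, assignWeightsLoop, assign_weights_alt, PySem.List.slice,
      PySem.List.enumerate, pvMAX_WEIGHTS, go_unfold, PySem.List.slice_from_one]
  | [a,b,c,d] =>
    simp [assign_weights, assignWeightsLoop, assign_weights_alt, PySem.List.slice,
      PySem.List.enumerate, pvMAX_WEIGHTS, go_unfold, PySem.List.slice_from_one]
  | a :: b :: c :: d :: e :: rest =>
    have h5 : PySem.List.slice (a :: b :: c :: d :: e :: rest) none (some (5 : Int))
        = [a, b, c, d, e] := by
      have := PySem.List.slice_to_natCast (a :: b :: c :: d :: e :: rest) 5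
      simpa using this
    simp [assign_weights, assignWeightsLoop, assign_weights_alt, h5,
      PySem.List.enumerate, pvMAX_WEIGHTS, go_unfold, PySem.List.slice_from_one]

-- ===== VERDICT =====
theorem assign_weights_spec : Claim_equal_assign_weights := by
  intro tag_ids _
  unfold Spec_assign_weights
  exact assign_weights_eq_alt tag_ids
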